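-- pv_equiv track=rewrite | github.com/sergey-yaroslavtsev/pymca | src/PyMca5/PyMcaCore/NexusDataSource.py | _to_slice_mode
-- ===== SOURCE A (Python) =====
-- def _to_slice_mode(single_idx, shape):
--     assert len(shape) > 1
--     if len(shape) == 2:
--         return [single_idx]
--     reference = single_idx
--     slice_index = [None] * (len(shape) - 1)
--     for i in range(len(shape)-1):
--         v = 1
--         for j in range(i+1, len(shape)-1):
--             v *= shape[j]
--         slice_index[i] = reference // v
--         reference = reference % v
--     return slice_index
-- ===== SOURCE B (Python) =====
-- def _to_slice_mode(single_idx, shape):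
--     assert len(shape) > 1
--     # suffix products of the middle dimensions, built in one backward pass:
--     # prods[i] == shape[i+1] * ... * shape[len(shape)-2]  (1 for i == len(shape)-2)
--     prods = [1]
--     acc = 1
--     for d in reversed(shape[1:len(shape) - 1]):
--         acc = acc * d
--         prods.append(acc)
--     prods.reverse()
--     slice_index = []
--     reference = single_idx
--     for v in prods:
--         slice_index.append(reference // v)
--         reference = reference % v
--     return slice_index
-- ===== Notes on version B (the rewrite author's own statement) =====
-- stated objective: faster
-- what changed: Replaces A's nested loop that recomputes each suffix product from scratch with one backward pass accumulating all suffix products, followed by a single forward divmod pass.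
import Mathlib
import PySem

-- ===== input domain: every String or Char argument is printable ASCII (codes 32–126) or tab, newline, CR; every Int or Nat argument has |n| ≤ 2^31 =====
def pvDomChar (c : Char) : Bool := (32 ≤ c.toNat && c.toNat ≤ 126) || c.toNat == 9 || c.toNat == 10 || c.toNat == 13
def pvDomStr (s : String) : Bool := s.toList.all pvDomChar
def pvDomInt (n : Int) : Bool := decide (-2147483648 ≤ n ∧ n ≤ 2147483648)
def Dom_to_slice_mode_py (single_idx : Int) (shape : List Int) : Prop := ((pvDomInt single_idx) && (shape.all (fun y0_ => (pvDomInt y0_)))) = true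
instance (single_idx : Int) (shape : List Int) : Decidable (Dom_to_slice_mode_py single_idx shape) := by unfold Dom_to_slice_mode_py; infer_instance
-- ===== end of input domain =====

-- B replaces A's O(d^2) nested suffix-product recomputation with one backward accumulation
-- pass plus one forward divide/mod pass (O(d)).

-- ===== PORT A =====
def to_slice_mode_py (single_idx : Int) (shape : List Int) : List Int :=
  if shape.length = 2 then [single_idx]
  else
    (((PySem.List.pyRange 0 ((shape.length : Int) - 1) 1).foldl
      (fun (st : Int × List Int) i =>
        let v := (PySem.List.pyRange (i + 1) ((shape.length : Int) - 1) 1).foldl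
          (fun v j => v * PySem.List.pyGetD shape j 0) 1
        (PySem.Int.mod st.1 v, st.2 ++ [PySem.Int.floordiv st.1 v]))
      (single_idx, ([] : List Int)))).2

-- ===== PORT B =====
def to_slice_mode_py_alt (single_idx : Int) (shape : List Int) : List Int :=
  let mids := PySem.List.slice shape (some 1) (some ((shape.length : Int) - 1))
  let prods := ((mids.reverse.foldl
      (fun (st : Int × List Int) d => (st.1 * d, st.2 ++ [st.1 * d])) (1, [1]))).2.reverse
  (prods.foldl
      (fun (st : Int × List Int) v =>
        (PySem.Int.mod st.1 v, st.2 ++ [PySem.Int.floordiv st.1 v]))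
      (single_idx, ([] : List Int))).2

-- ===== PRECONDITION & SPEC =====
-- Pre_ excludes exactly where Python A raises: len(shape) <= 1 (AssertionError) and a zero
-- middle dimension shape[1:-1] (ZeroDivisionError when len(shape) > 2).
def Pre_to_slice_mode_py (single_idx : Int) (shape : List Int) : Prop :=
  1 < shape.length ∧
    ∀ d ∈ PySem.List.slice shape (some 1) (some ((shape.length : Int) - 1)), d ≠ 0
instance (single_idx : Int) (shape : List Int) : Decidable (Pre_to_slice_mode_py single_idx shape) := by unfold Pre_to_slice_mode_py; infer_instance

def pvWitness_to_slice_mode_py : Int × List Int := (5, [2, 3, 4])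

def Spec_to_slice_mode_py (single_idx : Int) (shape : List Int) (out : List Int) : Prop := out = to_slice_mode_py_alt single_idx shape
instance (single_idx : Int) (shape : List Int) (out : List Int) : Decidable (Spec_to_slice_mode_py single_idx shape out) := by unfold Spec_to_slice_mode_py; infer_instance

-- ===== CLAIM (what is proved, stated in full; the proofs are below) =====
def Claim_equal_to_slice_mode_py : Prop := ∀ (single_idx : Int) (shape : List Int), Dom_to_slice_mode_py single_idx shape → Pre_to_slice_mode_py single_idx shape → Spec_to_slice_mode_py single_idx shape (to_slice_mode_py single_idx shape)

-- ===== LEMMAS AND PROOFS =====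

-- canonical suffix products: entry k is the product of ms.drop k
def pvSufProds (ms : List Int) : List Int :=
  (List.range (ms.length + 1)).map (fun k => (ms.drop k).prod)

theorem pvMapGet (xs : List Int) :
    ∀ (m a : Nat), a + m ≤ xs.length →
      (PySem.List.pyRange (a : Int) ((a : Int) + (m : Int)) 1).map
          (fun j => PySem.List.pyGetD xs j 0) =
        (xs.drop a).take m := by
  intro m
  induction m with
  | zero =>
    intro a hb
    simp
  | succ m ih =>
    intro a hb
    have hlt : (a : Int) < (a : Int) + ((m+1 : Nat) : Int) := by omega
    rw [PySem.List.pyRange_one_cons hlt, List.map_cons]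
    have hstep : (a : Int) + ((m+1:Nat) : Int) = ((a + 1 : Nat) : Int) + ((m:Nat) : Int) := by
      push_cast; ring
    have hs2 : (a : Int) + 1 = ((a + 1 : Nat) : Int) := by push_cast; ring
    rw [hstep, hs2, ih (a+1) (by omega)]
    have halen : (a : Int) < (xs.length : Int) := by omega
    rw [PySem.List.pyGetD_eq_getElem xs (0:Int) (by omega) halen]
    have hanat : a < xs.length := by omega
    simp only [Int.toNat_natCast]
    rw [List.drop_eq_getElem_cons hanat, List.take_succ_cons]

theorem pvFoldAcc :
    ∀ (rs : List Int) (a : Int) (l : List Int),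
      (rs.foldl (fun (st : Int × List Int) d => (st.1 * d, st.2 ++ [st.1 * d])) (a, l)).2 =
        l ++ (List.range rs.length).map (fun t => a * (rs.take (t+1)).prod) := by
  intro rs
  induction rs with
  | nil => intro a l; simp
  | cons d ds ih =>
    intro a l
    rw [List.foldl_cons]
    rw [ih (a*d) (l ++ [a*d])]
    simp [List.range_succ_eq_map, List.map_map, Function.comp_def, mul_assoc]

theorem pvBSide (ms : List Int) :
    ((ms.reverse.foldl (fun (st : Int × List Int) d => (st.1 * d, st.2 ++ [st.1 * d]))
        (1, [1]))).2.reverse = pvSufProds ms := by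
  rw [pvFoldAcc]
  unfold pvSufProds
  rw [List.range_succ, List.map_append, List.reverse_append]
  have hlast : ((List.range 1).map fun k => (ms.drop (ms.length + k)).prod) = [1] := by
    simp
  congr 1
  · apply List.ext_getElem
    · simp
    · intro i h1 h2
      rw [List.getElem_reverse]
      simp only [List.getElem_map, List.getElem_range, List.length_map, List.length_range,
        List.length_reverse, one_mul]
      have hi : i < ms.length := by simpa using h2
      have h3 : ms.length - 1 - i + 1 = ms.length - i := by omega
      rw [h3]
      rw [List.take_reverse]
      have h4 : ms.length - (ms.length - i) = i := by omega
      rw [h4, List.prod_reverse]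
  · simp

theorem pvASide (shape : List Int) (h : 2 ≤ shape.length) :
    (PySem.List.pyRange 0 ((shape.length : Int) - 1) 1).map
      (fun i => (PySem.List.pyRange (i + 1) ((shape.length : Int) - 1) 1).foldl
        (fun v j => v * PySem.List.pyGetD shape j 0) 1) =
      pvSufProds (PySem.List.slice shape (some 1) (some ((shape.length : Int) - 1))) := by
  have hmids : PySem.List.slice shape (some 1) (some ((shape.length : Int) - 1)) =
      (shape.drop 1).take (shape.length - 2) := by
    rw [PySem.List.slice_toNat shape (a := 1) (b := (shape.length : Int) - 1)
      (by omega) (by omega)]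
    simp only [Int.toNat_one]
    congr 1
    omega
  rw [hmids]
  unfold pvSufProds
  have hlen : ((shape.drop 1).take (shape.length - 2)).length = shape.length - 2 := by
    simp; omega
  rw [hlen]
  have hn1 : shape.length - 2 + 1 = shape.length - 1 := by omega
  rw [hn1]
  rw [PySem.List.pyRange_one, List.map_map]
  have h0 : (((shape.length : Int) - 1) - 0).toNat = shape.length - 1 := by omega
  rw [h0]
  apply List.map_congr_left
  intro k hk
  simp only [List.mem_range] at hk
  simp only [Function.comp_def, zero_add]
  have harg : ((shape.length : Int) - 1) = ((k:Int) + 1) + ((shape.length - 2 - k : Nat) : Int) := by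
    omega
  rw [harg]
  have hc : ((k:Int) + 1) = (((k + 1 : Nat)) : Int) := by push_cast; ring
  rw [hc]
  rw [← List.foldl_map (f := fun j => PySem.List.pyGetD shape j 0) (g := fun (x y : Int) => x * y)]
  rw [pvMapGet shape (shape.length - 2 - k) (k+1) (by omega)]
  rw [← List.prod_eq_foldl]
  rw [List.drop_take, List.drop_drop]
  have e2 : 1 + k = k + 1 := by omega
  rw [e2]

theorem pvKey (x : Int) (shape : List Int) (h : 2 ≤ shape.length) :
    to_slice_mode_py x shape = to_slice_mode_py_alt x shape := by
  have hB : to_slice_mode_py_alt x shape =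
      ((pvSufProds (PySem.List.slice shape (some 1) (some ((shape.length : Int) - 1)))).foldl
        (fun (st : Int × List Int) v =>
          (PySem.Int.mod st.1 v, st.2 ++ [PySem.Int.floordiv st.1 v]))
        (x, ([] : List Int))).2 := by
    simp only [to_slice_mode_py_alt]
    rw [pvBSide]
  rw [hB]
  by_cases h2 : shape.length = 2
  · simp only [to_slice_mode_py, if_pos h2]
    have hmids : PySem.List.slice shape (some 1) (some ((shape.length : Int) - 1)) = [] := by
      rw [PySem.List.slice_toNat shape (a := 1) (b := (shape.length : Int) - 1)
        (by omega) (by omega)]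
      simp [h2]
    rw [hmids]
    simp [pvSufProds]
  · simp only [to_slice_mode_py, if_neg h2]
    rw [← pvASide shape h]
    rw [List.foldl_map]

-- ===== VERDICT (by name: the statement is the Claim_ definition above) =====
theorem to_slice_mode_py_spec : Claim_equal_to_slice_mode_py := by
  intro x shape _ hpre
  unfold Spec_to_slice_mode_py
  exact pvKey x shape hpre.1
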